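-- pv_equiv track=rewrite | github.com/mibrl12/aoc2019 | day03/run.py | get_path_points
-- ===== SOURCE A (Python) =====
-- from typing import List, Tuple
--
-- def get_path_points(x, y, direction: str, distance: int) -> List[Tuple[int, int]]:
--     path_points = []
--
--     for i in range(distance):
--         if direction == 'L':
--             x, y = x - 1, y
--         if direction == 'R':
--             x, y = x + 1, y
--         if direction == 'D':
--             x, y = x, y - 1
--         if direction == 'U':
--             x, y = x, y + 1
--
--         path_points.append((x, y))
--
--     return path_points
-- ===== SOURCE B (Python) =====
-- def get_path_points(x, y, direction: str, distance: int):
--     dx, dy = {'L': (-1, 0), 'R': (1, 0), 'D': (0, -1), 'U': (0, 1)}.get(direction, (0, 0))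
--     return [(x + dx * (i + 1), y + dy * (i + 1)) for i in range(distance)]
-- ===== Notes on version B (the rewrite author's own statement) =====
-- stated objective: simpler
-- what changed: Resolve the direction to a single (dx,dy) offset once, then compute every point by a closed-form per-index formula instead of threading mutable x,y through per-iteration direction tests.
import Mathlib
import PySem

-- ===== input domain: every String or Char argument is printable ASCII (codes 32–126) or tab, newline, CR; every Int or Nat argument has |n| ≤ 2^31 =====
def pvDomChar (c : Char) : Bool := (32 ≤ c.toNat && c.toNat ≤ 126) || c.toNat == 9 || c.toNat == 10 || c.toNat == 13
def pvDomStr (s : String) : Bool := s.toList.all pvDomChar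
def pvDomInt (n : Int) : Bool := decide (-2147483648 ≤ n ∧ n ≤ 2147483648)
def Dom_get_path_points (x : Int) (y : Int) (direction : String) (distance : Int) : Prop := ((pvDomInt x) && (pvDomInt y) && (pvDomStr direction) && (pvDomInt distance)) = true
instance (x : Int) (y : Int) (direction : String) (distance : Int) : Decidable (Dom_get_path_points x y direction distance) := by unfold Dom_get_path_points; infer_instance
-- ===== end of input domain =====

-- B maps the direction to one (dx,dy) offset and emits each point by a closed-form
-- per-index formula; A threads x,y through per-iteration direction tests. Objective: simpler.

-- ===== PORT A =====
-- one iteration of A's loop body: the four successive ifs updating (x, y), then the append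
def pvStepA (direction : String) (s : (Int × Int) × List (Int × Int)) : (Int × Int) × List (Int × Int) :=
  let (xy, acc) := s
  let xy := if direction = "L" then (xy.1 - 1, xy.2) else xy
  let xy := if direction = "R" then (xy.1 + 1, xy.2) else xy
  let xy := if direction = "D" then (xy.1, xy.2 - 1) else xy
  let xy := if direction = "U" then (xy.1, xy.2 + 1) else xy
  (xy, acc ++ [xy])

def get_path_points (x : Int) (y : Int) (direction : String) (distance : Int) : List (Int × Int) :=
  ((PySem.List.pyRange 0 distance 1).foldl (fun s _ => pvStepA direction s) ((x, y), [])).2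

-- ===== PORT B =====
def pvOffset (direction : String) : Int × Int :=
  if direction = "L" then (-1, 0)
  else if direction = "R" then (1, 0)
  else if direction = "D" then (0, -1)
  else if direction = "U" then (0, 1)
  else (0, 0)

def get_path_points_alt (x : Int) (y : Int) (direction : String) (distance : Int) : List (Int × Int) :=
  let (dx, dy) := pvOffset direction
  (PySem.List.pyRange 0 distance 1).map (fun i => (x + dx * (i + 1), y + dy * (i + 1)))

-- ===== PRECONDITION & SPEC =====
def Spec_get_path_points (x : Int) (y : Int) (direction : String) (distance : Int) (out : List (Int × Int)) : Prop := out = get_path_points_alt x y direction distance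
instance (x : Int) (y : Int) (direction : String) (distance : Int) (out : List (Int × Int)) : Decidable (Spec_get_path_points x y direction distance out) := by unfold Spec_get_path_points; infer_instance

-- ===== CLAIM (what is proved, stated in full; the proofs are below) =====
def Claim_equal_get_path_points : Prop := ∀ (x : Int) (y : Int) (direction : String) (distance : Int), Dom_get_path_points x y direction distance → Spec_get_path_points x y direction distance (get_path_points x y direction distance)

-- ===== LEMMAS AND PROOFS =====

-- A's loop body is one fixed translation by the offset, whatever the direction string is
lemma pvStepA_eq (d : String) (a b : Int) (l : List (Int × Int)) :
    pvStepA d ((a, b), l) =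
      ((a + (pvOffset d).1, b + (pvOffset d).2),
       l ++ [(a + (pvOffset d).1, b + (pvOffset d).2)]) := by
  by_cases hL : d = "L" <;> by_cases hR : d = "R" <;> by_cases hD : d = "D" <;>
    by_cases hU : d = "U" <;> simp_all [pvStepA, pvOffset, Prod.ext_iff] <;> omega

-- the whole loop, in closed form (induction on the iteration count)
lemma pvLoop_eq (d : String) : ∀ (n : Nat) (x y : Int) (acc : List (Int × Int)),
    (List.range n).foldl (fun s _ => pvStepA d s) ((x, y), acc) =
      ((x + (pvOffset d).1 * n, y + (pvOffset d).2 * n),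
       acc ++ (List.range n).map
         (fun (k : Nat) => (x + (pvOffset d).1 * ((k : Int) + 1), y + (pvOffset d).2 * ((k : Int) + 1)))) := by
  intro n
  induction n with
  | zero => intro x y acc; simp
  | succ n ih =>
    intro x y acc
    rw [List.range_succ, List.foldl_append, ih]
    simp only [List.foldl_cons, List.foldl_nil, pvStepA_eq, List.map_append, List.map_cons,
      List.map_nil, List.append_assoc, Prod.mk.injEq]
    push_cast
    refine ⟨⟨by ring, by ring⟩, ?_⟩
    congr 3 <;> ring

theorem get_path_points_eq_alt (x y : Int) (d : String) (n : Int) :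
    get_path_points x y d n = get_path_points_alt x y d n := by
  unfold get_path_points get_path_points_alt
  rcases hpo : pvOffset d with ⟨dx, dy⟩
  rw [PySem.List.pyRange_one, List.foldl_map, pvLoop_eq, hpo]
  simp [List.map_map]

-- ===== VERDICT (by name: the statement is the Claim_ definition above) =====
theorem get_path_points_spec : Claim_equal_get_path_points := by
  intro x y d n _
  exact get_path_points_eq_alt x y d n
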